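-- pv_equiv track=rewrite | github.com/ltdt-apex/codeforces | question/others/td_16.py | findIndexofZero
-- ===== SOURCE A (Python) =====
-- from typing import List
-- from collections import defaultdict
--
-- def findIndexofZero(nums: List[int]) -> int:
--     # Write your code here...
--
--     d =defaultdict(int)
--     ans = 0
--     ind = -1
--     last = -1
--
--     l = 0
--     for r in range(len(nums)):
--         d[nums[r]] += 1
--
--         if nums[r] == 0:
--             last = r
--
--         while d[0] > 1:
--             d[nums[l]] -= 1
--             l+=1
--
--         if r-l+1 > ans:
--             ans = r-l+1
--             ind = last
--
--     return ind
-- ===== SOURCE B (Python) =====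
-- from typing import List
--
-- def findIndexofZero(nums: List[int]) -> int:
--     prev_zero = -1
--     prev_prev_zero = -1
--     best = 0
--     ind = -1
--     for r, x in enumerate(nums):
--         if x == 0:
--             prev_prev_zero = prev_zero
--             prev_zero = r
--         if r - prev_prev_zero > best:
--             best = r - prev_prev_zero
--             ind = prev_zero
--     return ind
-- ===== Notes on version B (the rewrite author's own statement) =====
-- stated objective: faster
-- what changed: Replaced the defaultdict counter and shrinking left pointer with a single pass tracking only the last and second-to-last zero positions as two scalars.
import Mathlib
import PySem

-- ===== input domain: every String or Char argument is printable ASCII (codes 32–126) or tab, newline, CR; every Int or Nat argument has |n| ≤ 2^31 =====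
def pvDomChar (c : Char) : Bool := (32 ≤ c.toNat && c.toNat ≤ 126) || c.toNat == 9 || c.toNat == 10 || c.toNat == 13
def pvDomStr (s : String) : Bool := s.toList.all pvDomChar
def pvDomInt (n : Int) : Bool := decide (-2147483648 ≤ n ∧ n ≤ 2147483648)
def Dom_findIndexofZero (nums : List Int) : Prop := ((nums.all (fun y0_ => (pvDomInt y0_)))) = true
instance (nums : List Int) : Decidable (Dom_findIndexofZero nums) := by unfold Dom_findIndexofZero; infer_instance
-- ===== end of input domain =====

-- B replaces A's defaultdict counter + shrinking left pointer with two scalars (last and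
-- second-to-last zero positions) in one pass; objective: simpler (O(1) extra space).

-- ===== PORT A =====
-- the inner 'while d[0] > 1' loop; fuel (= len(nums)) only guards totality, it is never
-- exhausted on reachable states (the loop runs at most pz+1-l ≤ len(nums) times)
def shrinkA (nums : List Int) (fuel : Nat) (d : PySem.Dict Int Int) (l : Int) :
    PySem.Dict Int Int × Int :=
  match fuel with
  | 0 => (d, l)
  | f + 1 =>
    if d.getD 0 0 > 1 then
      match PySem.List.pyGet? nums l with
      | some v => shrinkA nums f (d.insert v (d.getD v 0 - 1)) (l + 1)
      | none => (d, l)      -- IndexError: unreachable on states A produces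
    else (d, l)

-- 'for r in range(len(nums))': rest is the suffix nums[r:], so nums[r] is its head
def loopA (nums : List Int) (rest : List Int) (r : Int) (d : PySem.Dict Int Int)
    (ans ind last l : Int) : Int :=
  match rest with
  | [] => ind
  | x :: rest' =>
    let d1 := d.insert x (d.getD x 0 + 1)
    let last1 := if x = 0 then r else last
    let p := shrinkA nums nums.length d1 l
    if r - p.2 + 1 > ans then
      loopA nums rest' (r + 1) p.1 (r - p.2 + 1) last1 last1 p.2
    else
      loopA nums rest' (r + 1) p.1 ans ind last1 p.2

def findIndexofZero (nums : List Int) : Int :=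
  loopA nums nums 0 PySem.Dict.empty 0 (-1) (-1) 0

-- ===== PORT B =====
def loopB (rest : List Int) (r pz ppz best ind : Int) : Int :=
  match rest with
  | [] => ind
  | x :: rest' =>
    let pz1 := if x = 0 then r else pz
    let ppz1 := if x = 0 then pz else ppz
    if r - ppz1 > best then
      loopB rest' (r + 1) pz1 ppz1 (r - ppz1) pz1
    else
      loopB rest' (r + 1) pz1 ppz1 best ind

def findIndexofZero_alt (nums : List Int) : Int :=
  loopB nums 0 (-1) (-1) 0 (-1)

-- ===== PRECONDITION & SPEC =====
def Spec_findIndexofZero (nums : List Int) (out : Int) : Prop := out = findIndexofZero_alt nums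
instance (nums : List Int) (out : Int) : Decidable (Spec_findIndexofZero nums out) := by unfold Spec_findIndexofZero; infer_instance

-- ===== CLAIM (what is proved, stated in full; the proofs are below) =====
def Claim_equal_findIndexofZero : Prop := ∀ (nums : List Int), Dom_findIndexofZero nums → Spec_findIndexofZero nums (findIndexofZero nums)

-- ===== LEMMAS AND PROOFS =====

lemma shrink_noop (nums : List Int) (fuel : Nat) (d : PySem.Dict Int Int) (l : Int)
    (h : d.getD 0 0 ≤ 1) : shrinkA nums fuel d l = (d, l) := by
  cases fuel with
  | zero => rfl
  | succ f => simp [shrinkA, if_neg (by omega : ¬ d.getD 0 0 > 1)]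

lemma shrink_run (nums : List Int) (pzN : Nat) (hlen : pzN < nums.length)
    (hz : nums[pzN]? = some 0) :
    ∀ (fuel lN : Nat) (d : PySem.Dict Int Int),
      lN ≤ pzN → pzN + 1 - lN ≤ fuel →
      (∀ i : Nat, lN ≤ i → i < pzN → nums[i]? ≠ some 0) →
      d.getD 0 0 = 2 →
      ∃ d2, shrinkA nums fuel d (lN : Int) = (d2, (pzN : Int) + 1) ∧ d2.getD 0 0 = 1 := by
  intro fuel
  induction fuel with
  | zero => intro lN d h1 h2 _ _; omega
  | succ f ih =>
    intro lN d h1 h2 hnz hd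
    have hlN : lN < nums.length := by omega
    have hget : PySem.List.pyGet? nums (lN : Int) = some nums[lN] := by
      simp [PySem.List.pyGet?_natCast, List.getElem?_eq_getElem hlN]
    by_cases hcase : lN = pzN
    · subst hcase
      have hx : nums[lN] = 0 := by
        have := hz; rw [List.getElem?_eq_getElem hlN] at this; exact Option.some.inj this
      refine ⟨d.insert 0 (d.getD 0 0 - 1), ?_, ?_⟩
      · rw [shrinkA, if_pos (by omega), hget]
        simp only [hx]
        have : ((lN : Int) + 1) = ((lN : Int) + 1) := rfl
        rw [shrink_noop nums f _ _ (by simp; omega)]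
      · simp; omega
    · have hlt : lN < pzN := by omega
      have hv : nums[lN] ≠ 0 := by
        intro h0
        exact hnz lN le_rfl hlt (by rw [List.getElem?_eq_getElem hlN, h0])
      have step : shrinkA nums (f + 1) d (lN : Int) =
          shrinkA nums f (d.insert nums[lN] (d.getD nums[lN] 0 - 1)) ((lN : Int) + 1) := by
        rw [shrinkA, if_pos (by omega), hget]
      have hd' : (d.insert nums[lN] (d.getD nums[lN] 0 - 1)).getD 0 0 = 2 := by
        rw [PySem.Dict.getD_insert]
        rw [if_neg (by exact fun h => hv h.symm)]
        exact hd
      have hcast : ((lN : Int) + 1) = ((lN + 1 : Nat) : Int) := by push_cast; ring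
      obtain ⟨d2, he, hg⟩ := ih (lN + 1) (d.insert nums[lN] (d.getD nums[lN] 0 - 1))
        (by omega) (by omega) (fun i hi1 hi2 => hnz i (by omega) hi2) hd'
      exact ⟨d2, by rw [step, hcast, he], hg⟩

lemma loop_eq (nums : List Int) :
    ∀ (rest : List Int) (rn : Nat) (d : PySem.Dict Int Int) (ans ind pz ppz : Int),
      nums.drop rn = rest →
      (∀ i : Nat, ppz < (i : Int) → (i : Int) < (rn : Int) →
        (nums[i]? = some 0 ↔ (i : Int) = pz)) →
      ((pz = -1 ∧ ppz = -1) ∨ (0 ≤ pz ∧ pz < (rn : Int) ∧ -1 ≤ ppz ∧ ppz < pz)) →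
      d.getD 0 0 = (if pz = -1 then 0 else 1) →
      loopA nums rest (rn : Int) d ans ind pz (ppz + 1) = loopB rest (rn : Int) pz ppz ans ind := by
  intro rest
  induction rest with
  | nil => intro rn d ans ind pz ppz _ _ _ _; rfl
  | cons x rest' ih =>
    intro rn d ans ind pz ppz hdrop hwin hshape hd
    have hrn : rn < nums.length := by
      by_contra h
      rw [List.drop_eq_nil_of_le (by omega)] at hdrop
      exact (List.cons_ne_nil x rest') hdrop.symm
    have hx : nums[rn] = x := by
      have h2 : (nums.drop rn)[0]? = some x := by rw [hdrop]; rfl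
      rw [List.getElem?_drop] at h2
      rw [List.getElem?_eq_getElem (by omega : rn + 0 < nums.length)] at h2
      simpa using Option.some.inj h2
    have hdrop' : nums.drop (rn + 1) = rest' := by
      have : nums.drop (rn + 1) = (nums.drop rn).drop 1 := by
        rw [List.drop_drop]
      rw [this, hdrop]; rfl
    have hcast : ((rn : Int) + 1) = ((rn + 1 : Nat) : Int) := by push_cast; ring
    by_cases hx0 : x = 0
    · -- nums[r] == 0
      subst hx0
      rcases hshape with ⟨hpz, hppz⟩ | ⟨hpz0, hpzr, hppz1, hppz2⟩
      · -- first zero ever: window count becomes 1, no shrink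
        subst hpz; subst hppz
        have hd1 : (d.insert 0 (d.getD 0 0 + 1)).getD 0 0 = 1 := by
          simp; omega
        have hwin' : ∀ i : Nat, (-1 : Int) < (i : Int) → (i : Int) < ((rn + 1 : Nat) : Int) →
            (nums[i]? = some 0 ↔ (i : Int) = (rn : Int)) := by
          intro i hi1 hi2
          by_cases hi : i = rn
          · subst hi; simp [List.getElem?_eq_getElem hrn, hx]
          · have hilt : (i : Int) < (rn : Int) := by
              have : i < rn + 1 := by exact_mod_cast hi2
              have : i < rn := by omega
              exact_mod_cast this
            rw [hwin i hi1 hilt]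
            constructor
            · intro h; omega
            · intro h; exact absurd h (by omega)
        have hrec : ∀ a b : Int, loopA nums rest' ((rn + 1 : Nat) : Int) (d.insert 0 (d.getD 0 0 + 1)) a b (rn : Int) (-1 + 1) = loopB rest' ((rn + 1 : Nat) : Int) (rn : Int) (-1) a b :=
          fun a b => ih (rn + 1) (d.insert 0 (d.getD 0 0 + 1)) a b (rn : Int) (-1) hdrop'
            hwin' (Or.inr ⟨by omega, by push_cast; omega, by omega, by omega⟩) (by rw [hd1]; rw [if_neg (by omega)])
        simp only [loopA, loopB]
        rw [shrink_noop nums nums.length _ _ (by omega)]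
        simp only []
        have harith : (rn : Int) - (-1 + 1) + 1 = (rn : Int) - (-1) := by ring
        rw [harith]
        split_ifs with hc
        · rw [hcast]; exact hrec _ _
        · rw [hcast]; exact hrec _ _
      · -- second (or later) zero: window count becomes 2, shrink to pz+1
        have hpzN : pz = ((pz.toNat : Nat) : Int) := by omega
        have hpzlen : pz.toNat < nums.length := by omega
        have hzpz : nums[pz.toNat]? = some 0 := by
          have := (hwin pz.toNat (by omega) (by omega)).mpr (by omega)
          exact this
        have hd1 : (d.insert 0 (d.getD 0 0 + 1)).getD 0 0 = 2 := by
          rw [hd, if_neg (by omega)]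
          simp
        have hlN : ((ppz + 1).toNat : Int) = ppz + 1 := by omega
        obtain ⟨d2, he, hg⟩ := shrink_run nums pz.toNat hpzlen hzpz nums.length (ppz + 1).toNat
          (d.insert 0 (d.getD 0 0 + 1)) (by omega) (by omega)
          (fun i hi1 hi2 => by
            intro h0
            have := (hwin i (by omega) (by omega)).mp h0
            omega)
          hd1
        rw [hlN] at he
        have hwin' : ∀ i : Nat, pz < (i : Int) → (i : Int) < ((rn + 1 : Nat) : Int) →
            (nums[i]? = some 0 ↔ (i : Int) = (rn : Int)) := by
          intro i hi1 hi2
          by_cases hi : i = rn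
          · subst hi; simp [List.getElem?_eq_getElem hrn, hx]
          · have hilt : (i : Int) < (rn : Int) := by
              have : i < rn + 1 := by exact_mod_cast hi2
              have : i < rn := by omega
              exact_mod_cast this
            rw [hwin i (by omega) hilt]
            constructor
            · intro h; omega
            · intro h; exact absurd h (by omega)
        have hrec : ∀ a b : Int, loopA nums rest' ((rn + 1 : Nat) : Int) d2 a b (rn : Int) (pz + 1) = loopB rest' ((rn + 1 : Nat) : Int) (rn : Int) pz a b :=
          fun a b => ih (rn + 1) d2 a b (rn : Int) pz hdrop'
            hwin' (Or.inr ⟨by omega, by push_cast; omega, by omega, by omega⟩)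
            (by rw [hg]; rw [if_neg (by omega)])
        simp only [loopA, loopB]
        rw [he]
        simp only []
        have harith : (rn : Int) - ((pz.toNat : Int) + 1) + 1 = (rn : Int) - pz := by omega
        rw [harith]
        have hl2 : ((pz.toNat : Int) + 1) = pz + 1 := by omega
        rw [hl2]
        split_ifs with hc
        · rw [hcast]; exact hrec _ _
        · rw [hcast]; exact hrec _ _
    · -- nums[r] != 0: count unchanged, no shrink
      have hd1 : (d.insert x (d.getD x 0 + 1)).getD 0 0 = d.getD 0 0 := by
        rw [PySem.Dict.getD_insert, if_neg (by exact fun h => hx0 h.symm)]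
      have hwin' : ∀ i : Nat, ppz < (i : Int) → (i : Int) < ((rn + 1 : Nat) : Int) →
          (nums[i]? = some 0 ↔ (i : Int) = pz) := by
        intro i hi1 hi2
        by_cases hi : i = rn
        · subst hi
          rw [List.getElem?_eq_getElem hrn, hx]
          constructor
          · intro h; exact absurd (Option.some.inj h) hx0
          · intro h
            rcases hshape with ⟨hpz, _⟩ | ⟨_, hpzr, _, _⟩ <;> omega
        · have hilt : (i : Int) < (rn : Int) := by
            have : i < rn + 1 := by exact_mod_cast hi2
            have : i < rn := by omega
            exact_mod_cast this
          exact hwin i hi1 hilt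
      have hshape' : ((pz = -1 ∧ ppz = -1) ∨
          (0 ≤ pz ∧ pz < ((rn + 1 : Nat) : Int) ∧ -1 ≤ ppz ∧ ppz < pz)) := by
        rcases hshape with ⟨hpz, hppz⟩ | ⟨h1, h2, h3, h4⟩
        · exact Or.inl ⟨hpz, hppz⟩
        · exact Or.inr ⟨h1, by push_cast; omega, h3, h4⟩
      have hrec : ∀ a b : Int, loopA nums rest' ((rn + 1 : Nat) : Int) (d.insert x (d.getD x 0 + 1)) a b pz (ppz + 1) = loopB rest' ((rn + 1 : Nat) : Int) pz ppz a b :=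
        fun a b => ih (rn + 1) (d.insert x (d.getD x 0 + 1)) a b pz ppz hdrop'
          hwin' hshape' (by rw [hd1, hd])
      simp only [loopA, loopB, if_neg hx0]
      rw [shrink_noop nums nums.length _ _ (by rw [hd1, hd]; split_ifs <;> omega)]
      simp only []
      have harith : (rn : Int) - (ppz + 1) + 1 = (rn : Int) - ppz := by ring
      rw [harith]
      split_ifs with hc
      · rw [hcast]; exact hrec _ _
      · rw [hcast]; exact hrec _ _

-- ===== VERDICT (by name: the statement is the Claim_ definition above) =====
theorem findIndexofZero_spec : Claim_equal_findIndexofZero := by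
  intro nums _
  unfold Spec_findIndexofZero findIndexofZero findIndexofZero_alt
  have h := loop_eq nums nums 0 PySem.Dict.empty 0 (-1) (-1) (-1)
    (by simp) (by intro i hi1 hi2; omega) (Or.inl ⟨rfl, rfl⟩)
    (by simp [PySem.Dict.getD_empty])
  simpa using h
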